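-- pv_equiv track=rewrite | github.com/Schmitz-I/CSE_415 | a4-starter-code/inky_KInARow.py | score_lines
-- ===== SOURCE A (Python) =====
-- def score_lines(single_line, symbols_for_win):
--     """
--     Helper function for the static evaluation function. Returns the value of a given line.
--     """
--     if('-' in single_line):
--         return 0
--
--     for i in range(symbols_for_win):
--         if(single_line.count("X") == (symbols_for_win-i) and single_line.count(" ") == i):
--             return 10**(symbols_for_win-i-1)
--
--         if(single_line.count("O") == (symbols_for_win-i) and single_line.count(" ") == i):
--             return -1*10**(symbols_for_win-i-1)
--
--     if(single_line.count(" ") == len(single_line)):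
--         return 0
--
--     return 0
-- ===== SOURCE B (Python) =====
-- def score_lines(single_line, symbols_for_win):
--     if '-' in single_line:
--         return 0
--     sp = single_line.count(' ')
--     if 0 <= sp < symbols_for_win:
--         if single_line.count('X') == symbols_for_win - sp:
--             return 10 ** (symbols_for_win - sp - 1)
--         if single_line.count('O') == symbols_for_win - sp:
--             return -(10 ** (symbols_for_win - sp - 1))
--     return 0
-- ===== Notes on version B (the rewrite author's own statement) =====
-- stated objective: faster
-- what changed: Replaced the loop over i in range(symbols_for_win) (which recounts X/O/space on every iteration) by computing the space count once and testing the single index i = count(' ') that could ever fire, with the X-before-O priority kept.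
import Mathlib
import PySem

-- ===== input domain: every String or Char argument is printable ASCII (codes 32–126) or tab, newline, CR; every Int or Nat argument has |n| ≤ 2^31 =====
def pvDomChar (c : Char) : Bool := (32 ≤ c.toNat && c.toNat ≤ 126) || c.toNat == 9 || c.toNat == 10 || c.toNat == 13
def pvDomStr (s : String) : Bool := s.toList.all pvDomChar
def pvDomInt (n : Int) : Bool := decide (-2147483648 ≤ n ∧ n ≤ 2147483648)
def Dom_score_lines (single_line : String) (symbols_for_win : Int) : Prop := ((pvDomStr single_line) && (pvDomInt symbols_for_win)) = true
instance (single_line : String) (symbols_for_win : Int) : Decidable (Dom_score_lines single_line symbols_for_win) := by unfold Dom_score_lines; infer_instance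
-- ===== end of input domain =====

-- B replaces A's loop (which recounts the symbols at every i) by counting once and
-- testing only i = count(' '), the only index at which A's conditions can hold.

-- ===== PORT A =====
-- the 'for i in range(symbols_for_win)' loop with its early returns, over the range list
def scoreLoopA (s : String) (k : Int) : List Int → Option Int
  | [] => none
  | i :: rest =>
    if (PySem.Str.count s "X" : Int) = k - i ∧ (PySem.Str.count s " " : Int) = i then
      some ((10 : Int) ^ (k - i - 1).toNat)
    else if (PySem.Str.count s "O" : Int) = k - i ∧ (PySem.Str.count s " " : Int) = i then
      some (-((10 : Int) ^ (k - i - 1).toNat))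
    else scoreLoopA s k rest

def score_lines (single_line : String) (symbols_for_win : Int) : Int :=
  if PySem.Str.isIn "-" single_line then 0
  else
    match scoreLoopA single_line symbols_for_win (PySem.List.pyRange 0 symbols_for_win 1) with
    | some v => v
    | none =>
        if (PySem.Str.count single_line " " : Int) = PySem.Str.len single_line then 0
        else 0

-- ===== PORT B =====
def score_lines_alt (single_line : String) (symbols_for_win : Int) : Int :=
  if PySem.Str.isIn "-" single_line then 0
  else
    let sp : Int := PySem.Str.count single_line " "
    if 0 ≤ sp ∧ sp < symbols_for_win then
      if (PySem.Str.count single_line "X" : Int) = symbols_for_win - sp then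
        (10 : Int) ^ (symbols_for_win - sp - 1).toNat
      else if (PySem.Str.count single_line "O" : Int) = symbols_for_win - sp then
        -((10 : Int) ^ (symbols_for_win - sp - 1).toNat)
      else 0
    else 0

-- ===== PRECONDITION & SPEC =====
def Spec_score_lines (single_line : String) (symbols_for_win : Int) (out : Int) : Prop := out = score_lines_alt single_line symbols_for_win
instance (single_line : String) (symbols_for_win : Int) (out : Int) : Decidable (Spec_score_lines single_line symbols_for_win out) := by unfold Spec_score_lines; infer_instance

-- ===== CLAIM (what is proved, stated in full; the proofs are below) =====
def Claim_equal_score_lines : Prop := ∀ (single_line : String) (symbols_for_win : Int), Dom_score_lines single_line symbols_for_win → Spec_score_lines single_line symbols_for_win (score_lines single_line symbols_for_win)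

-- ===== LEMMAS AND PROOFS =====

-- the loop fires only at i = count(' '): its result over any list l of candidate indices
lemma scoreLoopA_eq (s : String) (k : Int) (l : List Int) :
    scoreLoopA s k l =
      if (PySem.Str.count s " " : Int) ∈ l then
        (if (PySem.Str.count s "X" : Int) = k - (PySem.Str.count s " " : Int) then
          some ((10 : Int) ^ (k - (PySem.Str.count s " " : Int) - 1).toNat)
        else if (PySem.Str.count s "O" : Int) = k - (PySem.Str.count s " " : Int) then
          some (-((10 : Int) ^ (k - (PySem.Str.count s " " : Int) - 1).toNat))
        else none)
      else none := by
  induction l with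
  | nil => simp [scoreLoopA]
  | cons i rest ih =>
    by_cases hi : (PySem.Str.count s " " : Int) = i
    · subst hi
      by_cases hx : (PySem.Str.count s "X" : Int) = k - (PySem.Str.count s " " : Int)
      · rw [scoreLoopA, if_pos ⟨hx, rfl⟩, if_pos (List.mem_cons_self), if_pos hx]
      · by_cases ho : (PySem.Str.count s "O" : Int) = k - (PySem.Str.count s " " : Int)
        · rw [scoreLoopA, if_neg (fun h => hx h.1), if_pos ⟨ho, rfl⟩,
            if_pos (List.mem_cons_self), if_neg hx, if_pos ho]
        · rw [scoreLoopA, if_neg (fun h => hx h.1), if_neg (fun h => ho h.1), ih,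
            if_pos (List.mem_cons_self), if_neg hx, if_neg ho]
          by_cases hm : (PySem.Str.count s " " : Int) ∈ rest
          · rw [if_pos hm]
          · rw [if_neg hm]
    · rw [scoreLoopA, if_neg (fun h => hi h.2), if_neg (fun h => hi h.2), ih]
      by_cases hm : (PySem.Str.count s " " : Int) ∈ rest
      · rw [if_pos hm, if_pos (List.mem_cons_of_mem _ hm)]
      · rw [if_neg hm, if_neg (fun h => hm ((List.mem_cons.mp h).resolve_left hi))]

-- ===== VERDICT (by name: the statement is the Claim_ definition above) =====
theorem score_lines_spec : Claim_equal_score_lines := by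
  intro s k _
  unfold Spec_score_lines score_lines score_lines_alt
  by_cases hd : PySem.Str.isIn "-" s = true
  · rw [if_pos hd, if_pos hd]
  · rw [if_neg hd, if_neg hd]
    rw [scoreLoopA_eq]
    by_cases hm : 0 ≤ (PySem.Str.count s " " : Int) ∧ (PySem.Str.count s " " : Int) < k
    · rw [if_pos (PySem.List.mem_pyRange_one.mpr hm), if_pos hm]
      split_ifs <;> rfl
    · rw [if_neg (fun h => hm (PySem.List.mem_pyRange_one.mp h)), if_neg hm]
      split_ifs <;> rfl
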